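-- pv_equiv track=rewrite | github.com/pvtrov/algorithms-and-data-structures | exercises_from_course/excercises_from_bit_/before_exams/exam_6th/egzP6a/egzP6a.py | count_letters_and_sort
-- ===== SOURCE A (Python) =====
-- def sort_in(letters_number):
--     max_ = -1
--     right_bucket = []
--
--     for tuple in letters_number:
--         if tuple[0] > max_:
--             max_ = tuple[0]
--
--     buckets = [[] for _ in range(max_+1)]
--     for tuple in letters_number:
--         buckets[tuple[0]].append(tuple)
--
--     for i in range(len(buckets)-1, -1, -1):
--         for j in range(len(buckets[i])):
--             right_bucket.append(buckets[i][j][1])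
--
--     return right_bucket
--
-- def count_letters_and_sort(bucket):
--     letters_number = []
--
--     for word in bucket:
--         counter = 0
--         for letter in word:
--             if 97 <= ord(letter) <= 123:
--                 counter += 1
--         letters_number.append((counter, word))
--
--     return sort_in(letters_number)
-- ===== SOURCE B (Python) =====
-- def count_letters_and_sort(bucket):
--     def cnt(word):
--         return sum(1 for letter in word if 97 <= ord(letter) <= 123)
--     return sorted(bucket, key=lambda w: -cnt(w))
-- ===== Notes on version B (the rewrite author's own statement) =====
-- stated objective: idiomatic
-- what changed: Replaces the hand-rolled bucket sort (explicit max scan, bucket table, reverse-index emission) with a single stable sorted() call keyed by the negated letter count.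
import Mathlib
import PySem

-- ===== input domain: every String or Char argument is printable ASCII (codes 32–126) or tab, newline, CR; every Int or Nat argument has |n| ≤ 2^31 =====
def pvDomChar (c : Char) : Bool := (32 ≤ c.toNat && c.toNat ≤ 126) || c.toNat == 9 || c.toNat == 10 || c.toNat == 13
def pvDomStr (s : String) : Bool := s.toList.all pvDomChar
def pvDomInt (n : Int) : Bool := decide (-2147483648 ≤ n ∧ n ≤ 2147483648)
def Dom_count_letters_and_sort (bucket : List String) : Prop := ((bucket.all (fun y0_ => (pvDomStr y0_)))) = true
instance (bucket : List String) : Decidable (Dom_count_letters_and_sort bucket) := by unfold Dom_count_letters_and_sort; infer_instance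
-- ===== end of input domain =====

-- B replaces A's hand-rolled bucket sort (max scan, bucket table, reverse-index emission)
-- with one stable sorted() call keyed by the negated letter count (97 ≤ ord(c) ≤ 123).

-- ===== PORT A =====
-- the test '97 <= ord(letter) <= 123', shared verbatim by both Pythons
def pvIsLetter (letter : Char) : Bool := decide (97 ≤ (letter.toNat : Int) ∧ (letter.toNat : Int) ≤ 123)

-- A's inner counting loop over a word
def pvCountA (word : String) : Int :=
  word.toList.foldl (fun counter letter => if pvIsLetter letter then counter + 1 else counter) 0

def sort_in (letters_number : List (Int × String)) : List String :=
  let max_ : Int := letters_number.foldl (fun m t => if t.1 > m then t.1 else m) (-1)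
  let buckets0 : List (List (Int × String)) := (PySem.List.pyRange 0 (max_ + 1) 1).map (fun _ => [])
  let buckets := letters_number.foldl
    (fun bs t => PySem.List.pySetD bs t.1 (PySem.List.pyGetD bs t.1 [] ++ [t])) buckets0
  (PySem.List.pyRange ((buckets.length : Int) - 1) (-1) (-1)).foldl
    (fun acc i =>
      (PySem.List.pyRange 0 ((PySem.List.pyGetD buckets i []).length : Int) 1).foldl
        (fun acc2 j => acc2 ++ [(PySem.List.pyGetD (PySem.List.pyGetD buckets i []) j (0, "")).2]) acc)
    []

def count_letters_and_sort (bucket : List String) : List String :=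
  sort_in (bucket.foldl (fun acc word => acc ++ [(pvCountA word, word)]) [])

-- ===== PORT B =====
-- Source B's cnt: sum(1 for letter in word if 97 <= ord(letter) <= 123)
def pvCountB (word : String) : Int :=
  ((word.toList.filter pvIsLetter).map (fun _ => (1 : Int))).sum

def count_letters_and_sort_alt (bucket : List String) : List String :=
  PySem.List.sorted bucket (fun w => -pvCountB w)

-- ===== PRECONDITION & SPEC =====
def Spec_count_letters_and_sort (bucket : List String) (out : List String) : Prop := out = count_letters_and_sort_alt bucket
instance (bucket : List String) (out : List String) : Decidable (Spec_count_letters_and_sort bucket out) := by unfold Spec_count_letters_and_sort; infer_instance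

-- ===== CLAIM (what is proved, stated in full; the proofs are below) =====
def Claim_equal_count_letters_and_sort : Prop := ∀ (bucket : List String), Dom_count_letters_and_sort bucket → Spec_count_letters_and_sort bucket (count_letters_and_sort bucket)

-- ===== LEMMAS AND PROOFS =====

-- the two counting styles agree
lemma pv_cnt_eq (w : String) : pvCountB w = pvCountA w := by
  simp [pvCountA, pvCountB, PySem.List.foldl_count_if, List.map_const',
        List.sum_replicate, List.countP_eq_length_filter]

lemma pv_cnt_nonneg (w : String) : 0 ≤ pvCountA w := by
  rw [← pv_cnt_eq]
  simp [pvCountB, List.map_const', List.sum_replicate]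

-- A's max-scan fold is a fold of max
lemma pv_max_spec (ps : List (Int × String)) :
    -1 ≤ ps.foldl (fun m t => if t.1 > m then t.1 else m) (-1) ∧
    ∀ t ∈ ps, t.1 ≤ ps.foldl (fun m t => if t.1 > m then t.1 else m) (-1) := by
  have h : ps.foldl (fun m t => if t.1 > m then t.1 else m) (-1)
      = (ps.map Prod.fst).foldl max (-1) := by
    rw [List.foldl_map]
    exact PySem.List.foldl_congr_mem ps _ _ (-1) (fun m t _ => by show (if t.1 > m then t.1 else m) = max m t.1; omega)
  rw [h]
  refine ⟨(PySem.List.le_foldl_max (ps.map Prod.fst) (-1)).1, ?_⟩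
  intro t ht
  exact (PySem.List.le_foldl_max (ps.map Prod.fst) (-1)).2 t.1 (List.mem_map_of_mem ht)

-- getD on a constant-[]-map is []
lemma pv_getD_const_nil {β : Type} (l : List β) (i : Nat) :
    (l.map (fun _ => ([] : List (Int × String)))).getD i [] = [] := by
  rw [List.getD_eq_getElem?_getD, List.getElem?_map]
  cases l[i]? <;> simp

-- bucket-filling invariant: bucket i collects exactly the pairs with first component i, in order
lemma pv_fill :
    ∀ (ps : List (Int × String)) (bs : List (List (Int × String))),
    (∀ t ∈ ps, 0 ≤ t.1 ∧ t.1 < (bs.length : Int)) →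
    (ps.foldl (fun bs t => PySem.List.pySetD bs t.1 (PySem.List.pyGetD bs t.1 [] ++ [t])) bs).length = bs.length ∧
    ∀ i : Nat, (ps.foldl (fun bs t => PySem.List.pySetD bs t.1 (PySem.List.pyGetD bs t.1 [] ++ [t])) bs).getD i []
        = bs.getD i [] ++ ps.filter (fun t => decide (t.1 = (i : Int))) := by
  intro ps
  induction ps with
  | nil => intro bs _; simp
  | cons t ps ih =>
    intro bs h
    obtain ⟨ht0, htl⟩ := h t (by simp)
    have hcast : t.1 = ((t.1.toNat : Nat) : Int) := (Int.toNat_of_nonneg ht0).symm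
    have hnlt : t.1.toNat < bs.length := by omega
    have hbs' : PySem.List.pySetD bs t.1 (PySem.List.pyGetD bs t.1 [] ++ [t])
        = bs.set t.1.toNat (bs.getD t.1.toNat [] ++ [t]) := by
      rw [hcast, PySem.List.pySetD_natCast, PySem.List.pyGetD_natCast]
      simp only [Int.toNat_natCast]
    have ih' := ih (bs.set t.1.toNat (bs.getD t.1.toNat [] ++ [t]))
      (by intro u hu; have := h u (by simp [hu]); simpa using this)
    simp only [List.foldl_cons, hbs']
    refine ⟨by rw [ih'.1]; simp, ?_⟩
    intro i
    rw [ih'.2 i, List.filter_cons]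
    by_cases hin : i = t.1.toNat
    · subst hin
      have hdec : decide (t.1 = ((t.1.toNat : Nat) : Int)) = true := by
        rw [← hcast]; simp
      rw [hdec]
      have hset : (bs.set t.1.toNat (bs.getD t.1.toNat [] ++ [t])).getD t.1.toNat []
          = bs.getD t.1.toNat [] ++ [t] := by
        simp [List.getD_eq_getElem?_getD, hnlt]
      rw [hset]; simp
    · have hdec : decide (t.1 = (i : Int)) = false := by simp; omega
      rw [hdec]
      have hset : (bs.set t.1.toNat (bs.getD t.1.toNat [] ++ [t])).getD i []
          = bs.getD i [] := by
        simp [List.getD_eq_getElem?_getD, List.getElem?_set_ne (by omega : t.1.toNat ≠ i)]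
      rw [hset]; simp

-- insertBy drops x exactly between the not-before prefix and the before suffix
lemma pv_insertBy_middle {α : Type} (bf : α → α → Bool) (x : α) :
    ∀ (G H : List α), (∀ g ∈ G, bf x g = false) → (∀ h ∈ H, bf x h = true) →
    PySem.List.insertBy bf x (G ++ H) = G ++ x :: H := by
  intro G
  induction G with
  | nil =>
    intro H _ hH
    cases H with
    | nil => rfl
    | cons h t =>
      show (if bf x h then x :: h :: t else h :: PySem.List.insertBy bf x t) = x :: h :: t
      rw [hH h (by simp)]
      simp
  | cons g G' ih =>
    intro H hG hH
    show (if bf x g then _ else g :: PySem.List.insertBy bf x (G' ++ H)) = g :: (G' ++ x :: H)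
    rw [hG g (by simp)]
    simp only [Bool.false_eq_true, if_false]
    rw [ih H (fun g' hg' => hG g' (by simp [hg'])) hH]

-- stable sort by an Int key = concatenation of the key-groups in ascending key order
lemma pv_sorted_eq_flatMap {α : Type} (key : α → Int) (L : List Int)
    (hL : L.Pairwise (· < ·)) :
    ∀ (xs : List α), (∀ x ∈ xs, key x ∈ L) →
      PySem.List.sorted xs key = L.flatMap (fun k => xs.filter (fun x => decide (key x = k))) := by
  intro xs
  induction xs using List.reverseRecOn with
  | nil => intro _; simp [PySem.List.sorted_eq_foldl_insertBy]
  | append_singleton xs x ih =>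
    intro hmem
    have hx : key x ∈ L := hmem x (by simp)
    obtain ⟨L1, L2, hsplit⟩ := List.append_of_mem hx
    have hih := ih (fun y hy => hmem y (by simp [hy]))
    rw [PySem.List.sorted_eq_foldl_insertBy, List.foldl_append, List.foldl_cons, List.foldl_nil,
        ← PySem.List.sorted_eq_foldl_insertBy, hih, hsplit]
    rw [hsplit] at hL
    rw [List.pairwise_append] at hL
    obtain ⟨hL1, hL2c, hcross⟩ := hL
    rw [List.pairwise_cons] at hL2c
    -- group functions before and after adding x
    have hfL1 : ∀ k ∈ L1, (xs ++ [x]).filter (fun y => decide (key y = k))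
        = xs.filter (fun y => decide (key y = k)) := by
      intro k hk
      have : key x ≠ k := by have := hcross k hk (key x) (by simp); omega
      simp [List.filter_append, this]
    have hfL2 : ∀ k ∈ L2, (xs ++ [x]).filter (fun y => decide (key y = k))
        = xs.filter (fun y => decide (key y = k)) := by
      intro k hk
      have : key x ≠ k := by have := hL2c.1 k hk; omega
      simp [List.filter_append, this]
    have hfx : (xs ++ [x]).filter (fun y => decide (key y = key x))
        = xs.filter (fun y => decide (key y = key x)) ++ [x] := by
      simp [List.filter_append]
    rw [List.flatMap_append, List.flatMap_cons, List.flatMap_append, List.flatMap_cons]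
    rw [List.flatMap_congr hfL1, List.flatMap_congr hfL2, hfx]
    rw [← List.append_assoc]
    rw [pv_insertBy_middle _ x
        (L1.flatMap (fun k => xs.filter (fun y => decide (key y = k)))
          ++ xs.filter (fun y => decide (key y = key x)))
        (L2.flatMap (fun k => xs.filter (fun y => decide (key y = k)))) ?_ ?_]
    · simp
    · intro g hg
      rcases List.mem_append.1 hg with hg | hg
      · obtain ⟨k, hk, hgk⟩ := List.mem_flatMap.1 hg
        have hkey : key g = k := by simpa using (List.mem_filter.1 hgk).2
        have : k < key x := hcross k hk (key x) (by simp)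
        simp [hkey]; omega
      · have hkey : key g = key x := by simpa using (List.mem_filter.1 hg).2
        simp [hkey]
    · intro g hg
      obtain ⟨k, hk, hgk⟩ := List.mem_flatMap.1 hg
      have hkey : key g = k := by simpa using (List.mem_filter.1 hgk).2
      have : key x < k := hL2c.1 k hk
      simp [hkey]; omega

-- A's sort_in, characterised: groups by first component, emitted in descending key order
lemma pv_sort_in_eq (ps : List (Int × String)) (h0 : ∀ t ∈ ps, 0 ≤ t.1) :
    sort_in ps = ((PySem.List.pyRange 0
        ((ps.foldl (fun m t => if t.1 > m then t.1 else m) (-1)) + 1) 1).reverse).flatMap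
      (fun i => (ps.filter (fun t => decide (t.1 = i))).map (·.2)) := by
  obtain ⟨hM1, hMub⟩ := pv_max_spec ps
  simp only [sort_in]
  set M := ps.foldl (fun m t => if t.1 > m then t.1 else m) (-1) with hM
  set b0 : List (List (Int × String)) :=
    (PySem.List.pyRange 0 (M + 1) 1).map (fun _ => []) with hb0
  have hb0len : b0.length = (M + 1).toNat := by
    simp [hb0, PySem.List.length_pyRange_one]
  have hbound : ∀ t ∈ ps, 0 ≤ t.1 ∧ t.1 < (b0.length : Int) := by
    intro t ht
    have h1 := h0 t ht; have h2 := hMub t ht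
    rw [hb0len]; omega
  have hfill := pv_fill ps b0 hbound
  set buckets := ps.foldl
    (fun bs t => PySem.List.pySetD bs t.1 (PySem.List.pyGetD bs t.1 [] ++ [t])) b0 with hB
  have hblen : buckets.length = (M + 1).toNat := by rw [hfill.1, hb0len]
  have hbk : ∀ i : Nat, buckets.getD i [] = ps.filter (fun t => decide (t.1 = (i : Int))) := by
    intro i
    rw [hfill.2 i, hb0, pv_getD_const_nil, List.nil_append]
  have hrange : PySem.List.pyRange ((buckets.length : Int) - 1) (-1) (-1)
      = (PySem.List.pyRange 0 (M + 1) 1).reverse := by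
    rw [PySem.List.pyRange_neg_one_eq_reverse, hblen]
    norm_num
    congr 1
    omega
  rw [hrange]
  have hbody : ∀ (acc : List String), ∀ i ∈ (PySem.List.pyRange 0 (M + 1) 1).reverse,
      (PySem.List.pyRange 0 ((PySem.List.pyGetD buckets i []).length : Int) 1).foldl
        (fun acc2 j => acc2 ++ [(PySem.List.pyGetD (PySem.List.pyGetD buckets i []) j (0, "")).2]) acc
      = acc ++ (ps.filter (fun t => decide (t.1 = i))).map (·.2) := by
    intro acc i hi
    rw [List.mem_reverse, PySem.List.mem_pyRange_one] at hi
    have hgd : PySem.List.pyGetD buckets i [] = ps.filter (fun t => decide (t.1 = i)) := by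
      rw [show i = ((i.toNat : Nat) : Int) from (Int.toNat_of_nonneg hi.1).symm,
          PySem.List.pyGetD_natCast, hbk]
    rw [hgd,
        PySem.List.foldl_pyRange_zero_pyGetD' (ps.filter (fun t => decide (t.1 = i)))
          ((0 : Int), "") (fun a (y : Int × String) => a ++ [y.2]) acc,
        PySem.List.foldl_append_singleton_eq_map (fun (y : Int × String) => y.2)]
  rw [PySem.List.foldl_congr_mem _ _ _ [] hbody,
      PySem.List.foldl_append_eq_flatMap, List.nil_append]

theorem pv_main (bucket : List String) :
    count_letters_and_sort bucket = count_letters_and_sort_alt bucket := by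
  unfold count_letters_and_sort count_letters_and_sort_alt
  rw [PySem.List.foldl_append_singleton_eq_map (fun w => (pvCountA w, w)) bucket [],
      List.nil_append]
  rw [pv_sort_in_eq _ (by
    intro t ht
    obtain ⟨w, _, rfl⟩ := List.mem_map.1 ht
    exact pv_cnt_nonneg w)]
  have hkey : (fun w => -pvCountB w) = fun w => -pvCountA w :=
    funext fun w => by rw [pv_cnt_eq]
  rw [hkey]
  obtain ⟨hM1, hMub⟩ := pv_max_spec (bucket.map (fun w => (pvCountA w, w)))
  set M := (bucket.map (fun w => (pvCountA w, w))).foldl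
    (fun m t => if t.1 > m then t.1 else m) (-1) with hM
  set ks := (PySem.List.pyRange 0 (M + 1) 1).reverse with hks
  have hpw : (ks.map (fun i => -i)).Pairwise (· < ·) := by
    rw [List.pairwise_map, hks, List.pairwise_reverse]
    exact (PySem.List.pairwise_lt_pyRange_one 0 (M + 1)).imp (by intro a b h; omega)
  have hmem : ∀ x ∈ bucket, (fun w => -pvCountA w) x ∈ ks.map (fun i => -i) := by
    intro x hx
    refine List.mem_map.2 ⟨pvCountA x, ?_, rfl⟩
    rw [hks, List.mem_reverse, PySem.List.mem_pyRange_one]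
    have hub := hMub (pvCountA x, x) (List.mem_map_of_mem hx)
    have := pv_cnt_nonneg x
    simp at hub ⊢
    omega
  rw [pv_sorted_eq_flatMap (fun w => -pvCountA w) (ks.map (fun i => -i)) hpw bucket hmem]
  rw [List.flatMap_map]
  apply List.flatMap_congr
  intro i hi
  rw [List.filter_map]
  have hpred : ((fun t => decide (t.1 = i)) ∘ (fun w => (pvCountA w, w)))
      = fun x => decide (-pvCountA x = -i) := by
    funext w; simp
  rw [hpred, List.map_map]
  have : ((fun y : Int × String => y.2) ∘ (fun w => (pvCountA w, w))) = id := rfl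
  rw [this, List.map_id]

-- ===== VERDICT (by name: the statement is the Claim_ definition above) =====
theorem count_letters_and_sort_spec : Claim_equal_count_letters_and_sort := by
  intro bucket _
  show count_letters_and_sort bucket = count_letters_and_sort_alt bucket
  exact pv_main bucket
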